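-- pv_equiv track=rewrite | github.com/k-roy/TRACE | workflow/scripts/classify_sample.py | find_best_alignment
-- ===== SOURCE A (Python) =====
-- def reverse_complement(seq):
--     """Return reverse complement of a DNA sequence."""
--     comp = {'A': 'T', 'T': 'A', 'G': 'C', 'C': 'G',
--             'a': 't', 't': 'a', 'g': 'c', 'c': 'g', 'N': 'N', 'n': 'n'}
--     return ''.join(comp.get(b, b) for b in reversed(seq))
--
-- def find_best_alignment(ref_seq, donor_seq):
--     """Find best alignment offset and orientation for donor in reference.
--
--     Returns:
--         (offset, donor_to_use, is_rc): Best offset, donor sequence to use, and whether it's RC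
--     """
--     ref_upper = ref_seq.upper()
--     donor_fwd = donor_seq
--     donor_rc = reverse_complement(donor_seq)
--
--     best_offset = 0
--     best_matches = 0
--     best_is_rc = False
--
--     # Try forward orientation
--     for offset in range(max(1, len(ref_upper) - len(donor_fwd) + 1)):
--         aligned = ref_upper[offset:offset + len(donor_fwd)]
--         if len(aligned) == len(donor_fwd):
--             matches = sum(1 for a, b in zip(aligned, donor_fwd.upper()) if a == b)
--             if matches > best_matches:
--                 best_matches = matches
--                 best_offset = offset
--                 best_is_rc = False
--
--     # Try reverse complement
--     for offset in range(max(1, len(ref_upper) - len(donor_rc) + 1)):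
--         aligned = ref_upper[offset:offset + len(donor_rc)]
--         if len(aligned) == len(donor_rc):
--             matches = sum(1 for a, b in zip(aligned, donor_rc.upper()) if a == b)
--             if matches > best_matches:
--                 best_matches = matches
--                 best_offset = offset
--                 best_is_rc = True
--
--     return best_offset, donor_rc if best_is_rc else donor_fwd, best_is_rc
-- ===== SOURCE B (Python) =====
-- def reverse_complement(seq):
--     """Return reverse complement of a DNA sequence."""
--     comp = {'A': 'T', 'T': 'A', 'G': 'C', 'C': 'G',
--             'a': 't', 't': 'a', 'g': 'c', 'c': 'g', 'N': 'N', 'n': 'n'}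
--     return ''.join(comp.get(b, b) for b in reversed(seq))
--
-- def find_best_alignment(ref_seq, donor_seq):
--     """Find best alignment offset and orientation for donor in reference,
--     via a per-character position index of the reference: match counts for all
--     offsets are accumulated sparsely with a moving two-pointer window, then the
--     counts are scanned once per orientation."""
--     ref_upper = ref_seq.upper()
--     n = len(ref_upper)
--     m = len(donor_seq)
--     donor_rc = reverse_complement(donor_seq)
--     if m > n:
--         return 0, donor_seq, False
--     L = n - m
--     pos = {}
--     for i, c in enumerate(ref_upper):
--         pos.setdefault(c, []).append(i)
--
--     def window_counts(donor):
--         cnt = [0] * (L + 1)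
--         ptr = {}
--         for j, c in enumerate(donor.upper()):
--             ps = pos.get(c, [])
--             i = ptr.get(c, 0)
--             while i < len(ps) and ps[i] < j:
--                 i += 1
--             ptr[c] = i
--             t = i
--             while t < len(ps) and ps[t] - j <= L:
--                 cnt[ps[t] - j] += 1
--                 t += 1
--         return cnt
--
--     best_offset, best_matches, best_is_rc = 0, 0, False
--     for off, c in enumerate(window_counts(donor_seq)):
--         if c > best_matches:
--             best_offset, best_matches, best_is_rc = off, c, False
--     for off, c in enumerate(window_counts(donor_rc)):
--         if c > best_matches:
--             best_offset, best_matches, best_is_rc = off, c, True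
--     return best_offset, donor_rc if best_is_rc else donor_seq, best_is_rc
-- ===== Notes on version B (the rewrite author's own statement) =====
-- stated objective: alternative
-- what changed: Replaces A's per-offset window slicing with zip-and-sum by a per-character position index of the reference: match counts for all offsets are accumulated sparsely (one increment per same-character pair whose offset fits, located with an amortized two-pointer window per character), then the counts array is scanned once per orientation.
import Mathlib
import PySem

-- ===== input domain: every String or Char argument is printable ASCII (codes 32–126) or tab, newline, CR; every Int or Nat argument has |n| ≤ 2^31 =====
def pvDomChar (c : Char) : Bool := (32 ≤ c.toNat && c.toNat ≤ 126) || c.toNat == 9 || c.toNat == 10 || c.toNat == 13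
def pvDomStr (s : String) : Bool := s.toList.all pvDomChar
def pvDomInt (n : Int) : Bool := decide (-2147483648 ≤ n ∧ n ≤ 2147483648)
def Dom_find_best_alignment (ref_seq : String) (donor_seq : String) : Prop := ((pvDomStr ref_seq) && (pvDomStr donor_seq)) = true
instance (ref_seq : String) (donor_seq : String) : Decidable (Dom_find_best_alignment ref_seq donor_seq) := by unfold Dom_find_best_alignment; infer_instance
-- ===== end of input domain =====

-- B replaces A's per-offset window slice + zip-count by a per-character position index of the
-- reference with sparse accumulation of all-offset match counts, then a single scan (alternative algorithm).

-- ===== PORT A =====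
-- helper shared by both Pythons: reverse_complement (identical source in Source A and Source B)
def pvCompDict : PySem.Dict Char Char :=
  PySem.Dict.ofList [('A','T'),('T','A'),('G','C'),('C','G'),('a','t'),('t','a'),('g','c'),('c','g'),('N','N'),('n','n')]

def pvRevComp (cs : List Char) : List Char :=
  cs.reverse.map (fun b => pvCompDict.getD b b)

-- one of A's two identical for-loops over offsets (forward / reverse-complement orientation)
def pvScanA (refU donor : List Char) (isRc : Bool) (st0 : Int × Int × Bool) : Int × Int × Bool :=
  (PySem.List.pyRange 0 (max 1 ((refU.length : Int) - (donor.length : Int) + 1)) 1).foldl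
    (fun st offset =>
      let aligned := PySem.List.slice refU (some offset) (some (offset + (donor.length : Int)))
      if aligned.length = donor.length then
        let mtc : Int := ((aligned.zip (PySem.Chars.upper donor)).map
          (fun p => if p.1 = p.2 then (1 : Int) else 0)).sum
        if mtc > st.2.1 then (offset, mtc, isRc) else st
      else st) st0

def find_best_alignment (ref_seq : String) (donor_seq : String) : Int × String × Bool :=
  let refU : List Char := PySem.Chars.upper ref_seq.toList
  let donorFwd : List Char := donor_seq.toList
  let donorRc : List Char := pvRevComp donorFwd
  let st1 := pvScanA refU donorFwd false (0, 0, false)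
  let st2 := pvScanA refU donorRc true st1
  (st2.1, if st2.2.2 then String.ofList donorRc else donor_seq, st2.2.2)

-- ===== PORT B =====
-- pos.setdefault(c, []).append(i) over enumerate(ref_upper): append i to pos[c] (creating [])
def pvPos (refU : List Char) : PySem.Dict Char (List Int) :=
  (PySem.List.enumerate refU 0).foldl (fun d ic => d.modify ic.2 [] (· ++ [ic.1])) PySem.Dict.empty

-- 'while i < len(ps) and ps[i] < j: i += 1' (i is a nonnegative Python int: Nat here, exact)
def pvSkip (ps : List Int) (j : Int) (i : Nat) : Nat :=
  if h : i < ps.length then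
    if ps[i] < j then pvSkip ps j (i + 1) else i
  else i
termination_by ps.length - i

-- 'while t < len(ps) and ps[t] - j <= L: cnt[ps[t] - j] += 1; t += 1'; entered at the skip
-- result, so ps[t] - j is nonnegative and at most L there: cnt[...] += 1 is exactly List.set
def pvEmit (ps : List Int) (j L : Int) (cnt : List Int) (t : Nat) : List Int :=
  if h : t < ps.length then
    if ps[t] - j ≤ L then
      pvEmit ps j L (cnt.set (ps[t] - j).toNat (cnt.getD ((ps[t] - j)).toNat 0 + 1)) (t + 1)
    else cnt
  else cnt
termination_by ps.length - t

def pvWindowCounts (pos : PySem.Dict Char (List Int)) (L : Int) (donor : List Char) : List Int :=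
  ((PySem.List.enumerate (PySem.Chars.upper donor) 0).foldl
    (fun st jc =>
      let ps := pos.getD jc.2 []
      let i := pvSkip ps jc.1 (st.1.getD jc.2 0)
      (st.1.insert jc.2 i, pvEmit ps jc.1 L st.2 i))
    ((PySem.Dict.empty : PySem.Dict Char Nat), List.replicate (L + 1).toNat 0)).2

def pvSelect (isRc : Bool) (st0 : Int × Int × Bool) (cnt : List Int) : Int × Int × Bool :=
  (PySem.List.enumerate cnt 0).foldl
    (fun st oc => if oc.2 > st.2.1 then (oc.1, oc.2, isRc) else st) st0

def find_best_alignment_alt (ref_seq : String) (donor_seq : String) : Int × String × Bool :=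
  let refU : List Char := PySem.Chars.upper ref_seq.toList
  let n : Int := refU.length
  let m : Int := donor_seq.toList.length
  let donorRc : List Char := pvRevComp donor_seq.toList
  if m > n then (0, donor_seq, false)
  else
    let L : Int := n - m
    let pos := pvPos refU
    let st1 := pvSelect false (0, 0, false) (pvWindowCounts pos L donor_seq.toList)
    let st2 := pvSelect true st1 (pvWindowCounts pos L donorRc)
    (st2.1, if st2.2.2 then String.ofList donorRc else donor_seq, st2.2.2)

-- ===== PRECONDITION & SPEC =====
def Spec_find_best_alignment (ref_seq : String) (donor_seq : String) (out : Int × String × Bool) : Prop := out = find_best_alignment_alt ref_seq donor_seq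
instance (ref_seq : String) (donor_seq : String) (out : Int × String × Bool) : Decidable (Spec_find_best_alignment ref_seq donor_seq out) := by unfold Spec_find_best_alignment; infer_instance

-- ===== CLAIM (what is proved, stated in full; the proofs are below) =====
def Claim_equal_find_best_alignment : Prop := ∀ (ref_seq : String) (donor_seq : String), Dom_find_best_alignment ref_seq donor_seq → Spec_find_best_alignment ref_seq donor_seq (find_best_alignment ref_seq donor_seq)

-- ===== LEMMAS AND PROOFS =====

-- cell k of an Int list (0 when out of range)
def pvG (l : List Int) (k : Nat) : Int := (l[k]?).getD 0

-- A's zip match count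
def pvZC (rs ds : List Char) : Int :=
  ((rs.zip ds).map (fun p => if p.1 = p.2 then (1 : Int) else 0)).sum

theorem pvUpper_length (cs : List Char) : (PySem.Chars.upper cs).length = cs.length := by
  simp [PySem.Chars.upper]

theorem pvRevComp_length (cs : List Char) : (pvRevComp cs).length = cs.length := by
  simp [pvRevComp]

theorem pvPos_getD (refU : List Char) (c : Char) :
    (pvPos refU).getD c [] =
      ((PySem.List.enumerate refU 0).filter (fun p => p.2 == c)).map (·.1) := by
  unfold pvPos
  rw [show (PySem.List.enumerate refU 0).foldl (fun d ic => d.modify ic.2 [] (· ++ [ic.1])) PySem.Dict.empty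
      = ((PySem.List.enumerate refU 0).map (fun ic => (ic.2, ic.1))).foldl
          (fun d p => d.modify p.1 [] (· ++ [p.2])) PySem.Dict.empty
    from (List.foldl_map (f := fun (ic : Int × Char) => (ic.2, ic.1))
      (g := fun (d : PySem.Dict Char (List Int)) (p : Char × Int) => d.modify p.1 [] (· ++ [p.2]))).symm]
  rw [PySem.Dict.getD_foldl_modify_append]
  simp [List.filter_map, List.map_map, Function.comp_def]

-- positions below the enumeration start never occur in the index list

theorem pvCount_low (cs : List Char) (c : Char) (s x : Int) (hx : x < s) :
    ((((PySem.List.enumerate cs s).filter (fun p => p.2 == c)).map (·.1)).count x) = 0 := by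
  induction cs generalizing s with
  | nil => simp [PySem.List.enumerate_nil]
  | cons a cs ih =>
    rw [PySem.List.enumerate_cons]
    by_cases h : a = c
    · simp only [List.filter_cons, h, beq_self_eq_true, if_pos, List.map_cons, List.count_cons]
      rw [ih (s+1) (by omega)]
      simp [show ¬ (s = x) from by omega]
    · simp only [List.filter_cons]
      rw [if_neg (by simp [h])]
      exact ih (s+1) (by omega)

-- position s + k occurs once iff cs[k] = c

theorem pvCount_posIdx (cs : List Char) (c : Char) (s : Int) (k : Nat) :
    ((((PySem.List.enumerate cs s).filter (fun p => p.2 == c)).map (·.1)).count (s + k)) =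
      if cs[k]? = some c then 1 else 0 := by
  induction cs generalizing s k with
  | nil => simp [PySem.List.enumerate_nil]
  | cons a cs ih =>
    rw [PySem.List.enumerate_cons]
    cases k with
    | zero =>
      by_cases h : a = c
      · simp only [List.filter_cons, h, beq_self_eq_true, if_pos, List.map_cons, List.count_cons]
        rw [show (s : Int) + ((0:Nat):Int) = s from by push_cast; ring]
        rw [pvCount_low cs c (s+1) s (by omega)]
        simp
      · simp only [List.filter_cons]
        rw [if_neg (by simp [h])]
        rw [show (s : Int) + ((0:Nat):Int) = s from by push_cast; ring]
        rw [pvCount_low cs c (s+1) s (by omega)]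
        simp [h]
    | succ k =>
      have hrec : ((((PySem.List.enumerate cs (s+1)).filter (fun p => p.2 == c)).map (·.1)).count ((s+1) + k)) = if cs[k]? = some c then 1 else 0 := ih (s+1) k
      by_cases h : a = c
      · simp only [List.filter_cons, h, beq_self_eq_true, if_pos, List.map_cons, List.count_cons]
        rw [show (s : Int) + (k+1 : Nat) = (s+1) + k from by push_cast; ring] at *
        rw [hrec]
        simp [show ¬ ((s:Int) = s + 1 + k) from by omega]
      · simp only [List.filter_cons]
        rw [if_neg (by simp [h])]
        rw [show (s : Int) + (k+1 : Nat) = (s+1) + k from by push_cast; ring]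
        rw [hrec]
        simp

theorem pvSkip_le (ps : List Int) (j : Int) (i : Nat) : i ≤ pvSkip ps j i := by
  fun_induction pvSkip with
  | case1 i h hlt ih => omega
  | case2 i h hlt => omega
  | case3 i h => omega

theorem pvSkip_prefix (ps : List Int) (j : Int) (i : Nat)
    (hpre : ∀ idx, idx < i → ∀ h : idx < ps.length, ps[idx] < j) :
    ∀ idx, idx < pvSkip ps j i → ∀ h : idx < ps.length, ps[idx] < j := by
  fun_induction pvSkip with
  | case1 i h hlt ih =>
    apply ih
    intro idx hidx hl
    rcases Nat.lt_succ_iff_lt_or_eq.mp hidx with h' | h'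
    · exact hpre idx h' hl
    · subst h'; exact hlt
  | case2 i h hlt => exact hpre
  | case3 i h => exact hpre

theorem pvSkip_stop (ps : List Int) (j : Int) (i : Nat) :
    ∀ h : pvSkip ps j i < ps.length, i ≤ pvSkip ps j i → j ≤ ps[pvSkip ps j i] := by
  fun_induction pvSkip with
  | case1 i h hlt ih => intro hh _; exact ih hh (pvSkip_le ps j (i+1))
  | case2 i h hlt => intro hh _; omega
  | case3 i h => intro hh _; omega

theorem pvEmit_length (ps : List Int) (j L : Int) (cnt : List Int) (t : Nat) :
    (pvEmit ps j L cnt t).length = cnt.length := by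
  fun_induction pvEmit with
  | case1 cnt t h hle ih => rw [ih]; simp
  | case2 cnt t h hle => rfl
  | case3 cnt t h => rfl

theorem pvEmit_g (ps : List Int) (j L : Int) (cnt : List Int) (t : Nat) (k : Nat)
    (hge : ∀ p ∈ ps.drop t, j ≤ p) (hkL : (k : Int) ≤ L) (hclen : (cnt.length : Int) = L + 1) :
    pvG (pvEmit ps j L cnt t) k =
      pvG cnt k + ((ps.drop t).takeWhile (fun p => decide (p - j ≤ L))).count ((k : Int) + j) := by
  fun_induction pvEmit with
  | case1 cnt t h hle ih =>
    rw [ih (by intro p hp; exact hge p (by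
          rw [List.drop_eq_getElem_cons h] at *; exact List.mem_cons_of_mem _ hp))
        (by simpa using hclen)]
    rw [List.drop_eq_getElem_cons h, List.takeWhile_cons]
    simp only [hle, decide_true, if_pos]
    rw [List.count_cons]
    have hp0 : (0:Int) ≤ ps[t] - j := by
      have := hge ps[t] (by rw [List.drop_eq_getElem_cons h]; exact List.mem_cons_self)
      omega
    have hk : k < cnt.length := by omega
    by_cases he : ps[t] = (k : Int) + j
    · have : (ps[t] - j).toNat = k := by omega
      rw [this]
      unfold pvG
      rw [List.getElem?_set_self hk]
      simp [List.getD_eq_getElem?_getD, List.getElem?_eq_getElem hk, he]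
      ring
    · have : (ps[t] - j).toNat ≠ k := by omega
      unfold pvG
      rw [List.getElem?_set_ne this]
      simp [he]
  | case2 cnt t h hle =>
    rw [List.drop_eq_getElem_cons h, List.takeWhile_cons]
    simp [hle]
  | case3 cnt t h =>
    rw [List.drop_eq_nil_of_le (by omega)]
    simp

theorem pvDropWhileHead (l : List Int) (p : Int → Bool) (a : Int) (tl : List Int)
    (h : l.dropWhile p = a :: tl) : ¬ p a = true := by
  have := List.head_dropWhile_not (p := p) (l := l) (by rw [h]; simp)
  simp only [h, List.head_cons] at this
  simp [this]

theorem pvPos_sorted (refU : List Char) (c : Char) :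
    ((pvPos refU).getD c []).Pairwise (· < ·) := by
  rw [pvPos_getD]
  rw [List.pairwise_map]
  exact (PySem.List.pairwise_lt_enumerate refU 0).sublist List.filter_sublist

-- all remaining elements are ≥ j after the skip

theorem pvDropGe (ps : List Int) (j : Int) (r : Nat)
    (hsort : ps.Pairwise (· < ·))
    (hstop : ∀ h : r < ps.length, j ≤ ps[r]) :
    ∀ p ∈ ps.drop r, j ≤ p := by
  intro p hp
  by_cases hr : r < ps.length
  · rw [List.drop_eq_getElem_cons hr] at hp
    rcases List.mem_cons.mp hp with h | h
    · subst h; exact hstop hr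
    · obtain ⟨idx, hidx, hval⟩ := List.getElem_of_mem h
      have hlen : r + 1 + idx < ps.length := by simp at hidx; omega
      rw [List.getElem_drop] at hval
      have : ps[r] < ps[r + 1 + idx] := by
        rw [List.pairwise_iff_getElem] at hsort
        exact hsort r (r+1+idx) hr hlen (by omega)
      have := hstop hr
      omega
  · rw [List.drop_eq_nil_of_le (by omega)] at hp
    simp at hp

-- the emitted segment contains every occurrence of k + j (k within the window)

theorem pvCount_bridge (ps : List Int) (j L : Int) (r : Nat) (k : Nat)
    (hsort : ps.Pairwise (· < ·))
    (hpre : ∀ idx, idx < r → ∀ h : idx < ps.length, ps[idx] < j)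
    (hkL : (k : Int) ≤ L) :
    ((ps.drop r).takeWhile (fun p => decide (p - j ≤ L))).count ((k : Int) + j) =
      ps.count ((k : Int) + j) := by
  conv_rhs => rw [← List.take_append_drop r ps]
  rw [List.count_append]
  have h1 : (ps.take r).count ((k : Int) + j) = 0 := by
    rw [List.count_eq_zero]
    intro hmem
    obtain ⟨idx, hidx, hval⟩ := List.getElem_of_mem hmem
    rw [List.getElem_take] at hval
    have hlt : idx < r := by simp at hidx; omega
    have := hpre idx hlt (by simp at hidx; omega)
    omega
  conv_rhs => rw [← List.takeWhile_append_dropWhile (p := fun p => decide (p - j ≤ L)) (l := ps.drop r)]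
  rw [List.count_append]
  have h2 : ((ps.drop r).dropWhile (fun p => decide (p - j ≤ L))).count ((k : Int) + j) = 0 := by
    cases hdw : (ps.drop r).dropWhile (fun p => decide (p - j ≤ L)) with
    | nil => simp
    | cons a tl =>
      have ha : ¬ (decide (a - j ≤ L)) = true := pvDropWhileHead _ _ _ _ hdw
      have haL : j + L < a := by simp at ha; omega
      have hsd : (a :: tl).Pairwise (· < ·) :=
        ((hsort.sublist (List.drop_sublist r ps)).sublist
          (by rw [← hdw]; exact List.dropWhile_sublist _))
      rw [List.count_eq_zero]
      intro hmem
      rcases List.mem_cons.mp hmem with h | h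
      · omega
      · have := (List.pairwise_cons.mp hsd).1 _ h
        omega
  omega

theorem pvZC_drop_cons (xs : List Char) (a : Nat) (c : Char) (ds : List Char) :
    pvZC (xs.drop a) (c :: ds) =
      (if xs[a]? = some c then 1 else 0) + pvZC (xs.drop (a + 1)) ds := by
  by_cases h : a < xs.length
  · rw [List.drop_eq_getElem_cons h]
    unfold pvZC
    simp only [List.zip_cons_cons, List.map_cons, List.sum_cons, List.getElem?_eq_getElem h]
    rw [show xs.drop (a+1) = (xs.drop a).tail from by simp [List.tail_drop]]
    rw [List.drop_eq_getElem_cons h]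
    simp only [List.tail_cons]
    congr 1
    simp
  · have h1 : xs.drop a = [] := List.drop_eq_nil_of_le (by omega)
    have h2 : xs.drop (a+1) = [] := List.drop_eq_nil_of_le (by omega)
    rw [h1, h2]
    simp [pvZC, List.getElem?_eq_none (by omega : xs.length ≤ a)]

-- the accumulation loop over the donor computes A's zip match count at every offset cell

theorem pvOuter_g (refU : List Char) (L : Int) (ds : List Char) (s : Int)
    (ptr : PySem.Dict Char Nat) (cnt : List Int) (k : Nat)
    (hs : 0 ≤ s) (hkL : (k : Int) ≤ L) (hclen : (cnt.length : Int) = L + 1)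
    (hinv : ∀ c idx, idx < ptr.getD c 0 →
      ∀ h : idx < ((pvPos refU).getD c []).length, ((pvPos refU).getD c [])[idx] < s) :
    pvG ((PySem.List.enumerate ds s).foldl
        (fun st jc =>
          (st.1.insert jc.2 (pvSkip ((pvPos refU).getD jc.2 []) jc.1 (st.1.getD jc.2 0)),
           pvEmit ((pvPos refU).getD jc.2 []) jc.1 L st.2
             (pvSkip ((pvPos refU).getD jc.2 []) jc.1 (st.1.getD jc.2 0))))
        (ptr, cnt)).2 k
      = pvG cnt k + pvZC (refU.drop (k + s.toNat)) ds := by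
  induction ds generalizing s ptr cnt with
  | nil => simp [PySem.List.enumerate_nil, pvZC]
  | cons d ds ih =>
    rw [PySem.List.enumerate_cons, List.foldl_cons]
    dsimp only
    set ps := (pvPos refU).getD d [] with hps
    set r := pvSkip ps s (ptr.getD d 0) with hr
    have hsort := pvPos_sorted refU d
    have hprefix : ∀ idx, idx < r → ∀ h : idx < ps.length, ps[idx] < s :=
      pvSkip_prefix ps s (ptr.getD d 0) (fun idx hidx h => hinv d idx hidx h)
    rw [ih (s+1) (ptr.insert d r) (pvEmit ps s L cnt r) (by omega)
        (by rw [pvEmit_length]; exact hclen)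
        (by
          intro c idx hidx h
          by_cases hc : c = d
          · subst hc
            rw [PySem.Dict.getD_insert_self] at hidx
            exact lt_of_lt_of_le (hprefix idx hidx h) (by omega)
          · rw [PySem.Dict.getD_insert_of_ne (hne := hc)] at hidx
            exact lt_of_lt_of_le (hinv c idx hidx h) (by omega))]
    rw [pvEmit_g ps s L cnt r k
        (pvDropGe ps s r hsort (fun h => pvSkip_stop ps s (ptr.getD d 0) h (pvSkip_le _ _ _)))
        hkL hclen]
    rw [pvCount_bridge ps s L r k hsort hprefix hkL]
    rw [hps, pvPos_getD]
    rw [show (k : Int) + s = (0 : Int) + ((k + s.toNat : Nat) : Int) from by push_cast; omega]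
    rw [pvCount_posIdx]
    rw [pvZC_drop_cons]
    rw [show k + (s+1).toNat = (k + s.toNat) + 1 from by omega]
    push_cast
    split_ifs <;> ring

theorem pvOuter_length (refU : List Char) (L : Int) (ds : List (Int × Char))
    (st : PySem.Dict Char Nat × List Int) :
    ((ds.foldl
        (fun st jc =>
          (st.1.insert jc.2 (pvSkip ((pvPos refU).getD jc.2 []) jc.1 (st.1.getD jc.2 0)),
           pvEmit ((pvPos refU).getD jc.2 []) jc.1 L st.2
             (pvSkip ((pvPos refU).getD jc.2 []) jc.1 (st.1.getD jc.2 0))))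
        st).2).length = st.2.length := by
  induction ds generalizing st with
  | nil => rfl
  | cons d ds ih => rw [List.foldl_cons, ih]; dsimp only; rw [pvEmit_length]

theorem pvWindowCounts_length (refU : List Char) (L : Int) (donor : List Char) :
    (pvWindowCounts (pvPos refU) L donor).length = (L + 1).toNat := by
  unfold pvWindowCounts
  rw [pvOuter_length refU L]
  simp

theorem pvWindowCounts_g (refU : List Char) (L : Int) (donor : List Char) (k : Nat)
    (hkL : (k : Int) ≤ L) (hL : 0 ≤ L) :
    pvG (pvWindowCounts (pvPos refU) L donor) k =
      pvZC (refU.drop k) (PySem.Chars.upper donor) := by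
  unfold pvWindowCounts
  rw [pvOuter_g refU L _ 0 _ _ k le_rfl hkL (by simp; omega)
    (by intro c idx hidx h; simp [PySem.Dict.getD_empty] at hidx)]
  simp [pvG]

theorem pvZip_take (xs ys : List Char) : (xs.take ys.length).zip ys = xs.zip ys := by
  induction ys generalizing xs with
  | nil => simp
  | cons y ys ih =>
    cases xs with
    | nil => simp
    | cons x xs => simp [List.take_succ_cons, ih]

-- the two scans agree on every start state (donor fits in the reference)

theorem pvScan_eq (refU donor : List Char) (isRc : Bool) (st0 : Int × Int × Bool)
    (hmn : donor.length ≤ refU.length) :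
    pvScanA refU donor isRc st0 =
      pvSelect isRc st0
        (pvWindowCounts (pvPos refU) ((refU.length : Int) - (donor.length : Int)) donor) := by
  have hL : (0:Int) ≤ (refU.length : Int) - (donor.length : Int) := by
    have := hmn; omega
  set L : Int := (refU.length : Int) - (donor.length : Int) with hLdef
  set cnt : List Int := pvWindowCounts (pvPos refU) L donor with hcnt
  have hclen : cnt.length = (L + 1).toNat := pvWindowCounts_length refU L donor
  unfold pvScanA pvSelect
  rw [show max 1 (L + 1) = L + 1 from by omega]
  rw [PySem.List.enumerate_eq_map_pyRange (d := 0)]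
  rw [List.foldl_map]
  rw [show PySem.List.len cnt = L + 1 from by simp only [PySem.List.len]; rw [hclen]; omega]
  apply PySem.List.foldl_congr_mem
  intro st j hj
  rw [PySem.List.mem_pyRange_one] at hj
  have hj0 : 0 ≤ j := hj.1
  have hjL : j ≤ L := by omega
  -- A body
  rw [PySem.List.slice_toNat _ hj0 (by positivity)]
  rw [show ((j + (donor.length : Int)).toNat - j.toNat) = donor.length from by omega]
  rw [if_pos (by
    simp only [List.length_take, List.length_drop]
    omega)]
  -- B value
  have hY : PySem.List.pyGetD cnt j 0 = pvZC (refU.drop j.toNat) (PySem.Chars.upper donor) := by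
    rw [PySem.List.pyGetD_of_nonneg cnt 0 hj0, List.getD_eq_getElem?_getD]
    exact pvWindowCounts_g refU L donor j.toNat (by omega) hL
  have hX : ((((refU.drop j.toNat).take donor.length).zip (PySem.Chars.upper donor)).map
      (fun p => if p.1 = p.2 then (1 : Int) else 0)).sum
      = pvZC (refU.drop j.toNat) (PySem.Chars.upper donor) := by
    rw [show donor.length = (PySem.Chars.upper donor).length from (pvUpper_length donor).symm]
    rw [pvZip_take]
    rfl
  simp only [hX, hY]

-- A's scan does nothing when the donor is longer than the reference

theorem pvScanA_long (refU donor : List Char) (isRc : Bool) (st0 : Int × Int × Bool)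
    (h : refU.length < donor.length) :
    pvScanA refU donor isRc st0 = st0 := by
  unfold pvScanA
  rw [show max 1 ((refU.length : Int) - (donor.length : Int) + 1) = 1 from by omega]
  rw [show PySem.List.pyRange 0 1 1 = [0] from by decide]
  rw [List.foldl_cons, List.foldl_nil]
  rw [PySem.List.slice_toNat _ le_rfl (by positivity)]
  simp only [Int.toNat_zero, List.drop_zero, Int.toNat_natCast, Nat.sub_zero,
    List.length_take, zero_add]
  rw [if_neg (by omega)]

-- ===== VERDICT (by name: the statement is the Claim_ definition above) =====

-- ===== VERDICT (by name: the statement is the Claim_ definition above) =====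
theorem find_best_alignment_spec : Claim_equal_find_best_alignment := by
  intro ref_seq donor_seq _
  unfold Spec_find_best_alignment find_best_alignment find_best_alignment_alt
  dsimp only
  by_cases hmn : (donor_seq.toList.length : Int) > ((PySem.Chars.upper ref_seq.toList).length : Int)
  · rw [if_pos hmn]
    rw [pvScanA_long _ _ _ _ (by rw [pvRevComp_length]; omega)]
    rw [pvScanA_long _ _ _ _ (by omega)]
    simp
  · rw [if_neg hmn]
    rw [pvScan_eq _ _ _ _ (by rw [pvRevComp_length]; omega)]
    rw [pvScan_eq _ _ _ _ (by omega)]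
    rw [pvRevComp_length]
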